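-- pv_equiv track=rewrite | github.com/daxida/bioperm | KMUW.py | find_flanked_substrings
-- ===== SOURCE A (Python) =====
-- def find_flanked_substrings(sequence, k):
--     """
--     Identify all pairs of substrings that are disjoint, flanked by the same (k-1)-lets,
--     and satisfy the swapping conditions.
--     """
--     n = len(sequence)
--     candidates = []
--
--     for a in range(n - 2 * k + 2):
--         for b in range(a + k - 1, n - k + 1):
--             left_flank = sequence[a:a + k - 1]
--             right_flank = sequence[b:b + k - 1]
--
--             for c in range(b + k - 1, n - k + 1):
--                 for d in range(c + k - 1, n):
--                     if (sequence[a:a + k - 1] == sequence[c:c + k - 1] and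
--                             sequence[b:b + k - 1] == sequence[d:d + k - 1]):
--                         candidates.append(((a, b), (c, d)))
--
--     return candidates
-- ===== SOURCE B (Python) =====
-- def find_flanked_substrings(sequence, k):
--     n = len(sequence)
--     if n - 2 * k + 2 <= 0:
--         return []
--     flank = [sequence[i:i + k - 1] for i in range(n)]
--     positions = {}
--     for i in range(n):
--         positions.setdefault(flank[i], []).append(i)
--     out = []
--     for a in range(n - 2 * k + 2):
--         cs = positions[flank[a]]
--         for b in range(a + k - 1, n - k + 1):
--             ds = positions[flank[b]]
--             for c in cs:
--                 if b + k - 1 <= c <= n - k: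
--                     for d in ds:
--                         if c + k - 1 <= d:
--                             out.append(((a, b), (c, d)))
--     return out
-- ===== Notes on version B (the rewrite author's own statement) =====
-- stated objective: alternative
-- what changed: B slices each (k-1)-flank once into a list, groups all positions by flank in a dict built in one pass, and for each (a,b) enumerates only the positions whose flank matches (with interval guards), instead of A's four nested index loops that re-slice and compare flanks in the innermost loop.
import Mathlib
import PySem

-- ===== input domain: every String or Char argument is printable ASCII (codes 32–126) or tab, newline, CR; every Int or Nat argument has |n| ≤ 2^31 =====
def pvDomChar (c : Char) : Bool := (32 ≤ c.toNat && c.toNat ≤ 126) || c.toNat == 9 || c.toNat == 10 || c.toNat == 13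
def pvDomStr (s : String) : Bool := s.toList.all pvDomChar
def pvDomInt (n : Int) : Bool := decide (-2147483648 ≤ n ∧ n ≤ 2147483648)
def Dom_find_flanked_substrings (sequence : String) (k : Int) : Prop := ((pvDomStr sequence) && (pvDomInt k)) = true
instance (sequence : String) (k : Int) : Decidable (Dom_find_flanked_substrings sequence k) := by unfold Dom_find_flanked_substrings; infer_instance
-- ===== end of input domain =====

-- B slices each (k-1)-flank once and groups positions by flank in a dict built once, so the two
-- inner scans run only over the positions that share the flank (objective: alternative algorithm).

-- ===== PORT A =====
def find_flanked_substrings (sequence : String) (k : Int) : List ((Int × Int) × (Int × Int)) :=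
  let s := sequence.toList
  let n : Int := PySem.Str.len sequence
  (PySem.List.pyRange 0 (n - 2 * k + 2) 1).foldl (fun acc a =>
    (PySem.List.pyRange (a + k - 1) (n - k + 1) 1).foldl (fun acc b =>
      let _left_flank := PySem.List.slice s (some a) (some (a + k - 1))
      let _right_flank := PySem.List.slice s (some b) (some (b + k - 1))
      (PySem.List.pyRange (b + k - 1) (n - k + 1) 1).foldl (fun acc c =>
        (PySem.List.pyRange (c + k - 1) n 1).foldl (fun acc d =>
          if PySem.List.slice s (some a) (some (a + k - 1)) = PySem.List.slice s (some c) (some (c + k - 1)) ∧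
             PySem.List.slice s (some b) (some (b + k - 1)) = PySem.List.slice s (some d) (some (d + k - 1))
          then acc ++ [((a, b), (c, d))] else acc) acc) acc) acc) []

-- ===== PORT B =====
def find_flanked_substrings_alt (sequence : String) (k : Int) : List ((Int × Int) × (Int × Int)) :=
  let s := sequence.toList
  let n : Int := PySem.Str.len sequence
  if n - 2 * k + 2 ≤ 0 then [] else
  let flank := (PySem.List.pyRange 0 n 1).map (fun i => PySem.List.slice s (some i) (some (i + k - 1)))
  let positions := (PySem.List.pyRange 0 n 1).foldl
    (fun d i => d.modify (PySem.List.pyGetD flank i []) [] (fun v => v ++ [i])) PySem.Dict.empty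
  (PySem.List.pyRange 0 (n - 2 * k + 2) 1).foldl (fun acc a =>
    let cs := positions.getD (PySem.List.pyGetD flank a []) []
    (PySem.List.pyRange (a + k - 1) (n - k + 1) 1).foldl (fun acc b =>
      let ds := positions.getD (PySem.List.pyGetD flank b []) []
      cs.foldl (fun acc c =>
        if b + k - 1 ≤ c ∧ c ≤ n - k then
          ds.foldl (fun acc d =>
            if c + k - 1 ≤ d then acc ++ [((a, b), (c, d))] else acc) acc
        else acc) acc) acc) []

-- ===== PRECONDITION & SPEC =====
-- Pre_ excludes k ≤ 0, where the requested (k-1)-flank length is negative: A's value there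
-- (negative-length slices clamp to '' and trigger negative-index wraparound, so quadruples with
-- meaningless negative positions are returned) is an artefact of Python slice clamping, and B's
-- position table raises IndexError on those inputs.
def Pre_find_flanked_substrings (sequence : String) (k : Int) : Prop := 1 ≤ k
instance (sequence : String) (k : Int) : Decidable (Pre_find_flanked_substrings sequence k) := by unfold Pre_find_flanked_substrings; infer_instance
def pvWitness_find_flanked_substrings : String × Int := ("abab", 2)

def Spec_find_flanked_substrings (sequence : String) (k : Int) (out : List ((Int × Int) × (Int × Int))) : Prop := out = find_flanked_substrings_alt sequence k
instance (sequence : String) (k : Int) (out : List ((Int × Int) × (Int × Int))) : Decidable (Spec_find_flanked_substrings sequence k out) := by unfold Spec_find_flanked_substrings; infer_instance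

-- ===== CLAIM (what is proved, stated in full; the proofs are below) =====
def Claim_equal_find_flanked_substrings : Prop := ∀ (sequence : String) (k : Int), Dom_find_flanked_substrings sequence k → Pre_find_flanked_substrings sequence k → Spec_find_flanked_substrings sequence k (find_flanked_substrings sequence k)

-- ===== LEMMAS AND PROOFS =====

theorem pv_flatMap_congr_mem {α β : Type} (l : List α) (f g : α → List β)
    (h : ∀ x ∈ l, f x = g x) : l.flatMap f = l.flatMap g := by
  induction l with
  | nil => rfl
  | cons x xs ih =>
      simp only [List.flatMap_cons, h x (by simp), ih (fun y hy => h y (by simp [hy]))]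

theorem pv_flatMap_filter {α β : Type} (l : List α) (p : α → Bool) (G : α → List β) :
    (l.filter p).flatMap G = l.flatMap (fun x => if p x then G x else []) := by
  induction l with
  | nil => rfl
  | cons x xs ih =>
      by_cases h : p x <;> simp [h, ih]

theorem pv_foldl_guard_append {α β : Type} (p : α → Prop) [DecidablePred p]
    (G : α → List β) (l : List α) (acc : List β) :
    l.foldl (fun acc x => if p x then acc ++ G x else acc) acc
      = acc ++ l.flatMap (fun x => if p x then G x else []) := by
  induction l generalizing acc with
  | nil => simp
  | cons x xs ih =>
      by_cases h : p x <;> simp [h, ih]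

theorem pv_filter_pyRange_sub (q : Int → Bool) (lo hi n : Int) (h0 : 0 ≤ lo) (hn : hi ≤ n) :
    (PySem.List.pyRange lo hi 1).filter q
      = (PySem.List.pyRange 0 n 1).filter (fun x => q x && decide (lo ≤ x ∧ x < hi)) := by
  by_cases hlh : lo ≤ hi
  · rw [PySem.List.pyRange_one_append 0 lo n h0 (le_trans hlh hn),
        PySem.List.pyRange_one_append lo hi n hlh hn]
    rw [List.filter_append, List.filter_append]
    have e1 : (PySem.List.pyRange 0 lo 1).filter (fun x => q x && decide (lo ≤ x ∧ x < hi)) = [] := by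
      rw [List.filter_eq_nil_iff]; intro x hx
      have := PySem.List.mem_pyRange_one.mp hx
      simp only [Bool.and_eq_true, decide_eq_true_eq]; omega
    have e2 : (PySem.List.pyRange hi n 1).filter (fun x => q x && decide (lo ≤ x ∧ x < hi)) = [] := by
      rw [List.filter_eq_nil_iff]; intro x hx
      have := PySem.List.mem_pyRange_one.mp hx
      simp only [Bool.and_eq_true, decide_eq_true_eq]; omega
    have e3 : (PySem.List.pyRange lo hi 1).filter (fun x => q x && decide (lo ≤ x ∧ x < hi))
        = (PySem.List.pyRange lo hi 1).filter q := by
      apply List.filter_congr; intro x hx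
      have := PySem.List.mem_pyRange_one.mp hx
      simp [this.1, this.2]
    rw [e1, e2, e3, List.nil_append, List.append_nil]
  · rw [PySem.List.pyRange_one_eq_nil (le_of_not_ge hlh), List.filter_nil]
    symm; rw [List.filter_eq_nil_iff]; intro x hx
    simp only [Bool.and_eq_true, decide_eq_true_eq]; omega

theorem pv_flatMap_pyRange_sub {β : Type} (G : Int → List β) (lo hi n : Int) (h0 : 0 ≤ lo) (hn : hi ≤ n) :
    (PySem.List.pyRange lo hi 1).flatMap G
      = (PySem.List.pyRange 0 n 1).flatMap (fun x => if lo ≤ x ∧ x < hi then G x else []) := by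
  have h := pv_filter_pyRange_sub (fun _ => true) lo hi n h0 hn
  simp only [List.filter_true, Bool.true_and] at h
  rw [h, pv_flatMap_filter]
  apply pv_flatMap_congr_mem; intro x _
  by_cases hx : lo ≤ x ∧ x < hi <;> simp [hx]

-- the dict built by "positions.setdefault(flank[i], []).append(i)" looked up at a key is the
-- list of positions whose key matches
theorem pv_group_getD {κ : Type} [BEq κ] [LawfulBEq κ] (l : List Int) (key : Int → κ) (F0 : κ) :
    ((l.foldl (fun d i => d.modify (key i) [] (fun v => v ++ [i])) PySem.Dict.empty).getD F0 [])
      = l.filter (fun i => key i == F0) := by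
  rw [← List.foldl_map (f := fun i => (key i, i)) (g := fun (d : PySem.Dict κ (List Int)) (p : κ × Int) => d.modify p.1 [] (fun v => v ++ [p.2]))]
  rw [PySem.Dict.getD_foldl_modify_append]
  simp [List.filter_map, Function.comp_def]

-- Core identity: A's two inner loops = B's two inner loops, flatMap form (generic flank map F)
theorem pv_core_gen (F : Int → List Char) (n k a b : Int) (hk : 1 ≤ k)
    (ha0 : 0 ≤ a) (hb1 : a + k - 1 ≤ b) :
    (PySem.List.pyRange (b + k - 1) (n - k + 1) 1).flatMap (fun c =>
        ((PySem.List.pyRange (c + k - 1) n 1).filter (fun d => decide (F a = F c ∧ F b = F d))).map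
          (fun d => (((a, b), (c, d)) : (Int × Int) × (Int × Int))))
  = ((PySem.List.pyRange 0 n 1).filter (fun i => F i == F a)).flatMap (fun c =>
      if b + k - 1 ≤ c ∧ c ≤ n - k then
        (((PySem.List.pyRange 0 n 1).filter (fun i => F i == F b)).filter
            (fun d => decide (c + k - 1 ≤ d))).map (fun d => ((a, b), (c, d)))
      else []) := by
  rw [pv_flatMap_filter]
  rw [pv_flatMap_pyRange_sub _ (b + k - 1) (n - k + 1) n (by omega) (by omega)]
  apply pv_flatMap_congr_mem
  intro c hc
  have hcm := PySem.List.mem_pyRange_one.mp hc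
  by_cases hg : b + k - 1 ≤ c ∧ c ≤ n - k
  · rw [if_pos (show b + k - 1 ≤ c ∧ c < n - k + 1 by omega)]
    by_cases hf : F a = F c
    · rw [if_pos (show (F c == F a) = true from beq_iff_eq.mpr hf.symm), if_pos hg]
      rw [pv_filter_pyRange_sub _ (c + k - 1) n n (by omega) le_rfl]
      rw [List.filter_filter]
      apply congrArg (List.map _)
      apply List.filter_congr
      intro d hd
      have hdm := PySem.List.mem_pyRange_one.mp hd
      by_cases h1 : F b = F d
      · by_cases h2 : c + k - 1 ≤ d
        · simp [hf, h1, h2, hdm.2]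
        · simp [hf, h1, h2]
      · have h1' : ¬ (F d = F b) := fun h => h1 h.symm
        by_cases h2 : c + k - 1 ≤ d
        · simp [hf, h1, h2]
          exact h1'
        · simp [hf, h1, h2]
    · rw [if_neg (show ¬ ((F c == F a) = true) from fun h => hf (beq_iff_eq.mp h).symm)]
      simp only [List.map_eq_nil_iff, List.filter_eq_nil_iff]
      intro d _
      simp [hf]
  · rw [if_neg (show ¬ (b + k - 1 ≤ c ∧ c < n - k + 1) by omega), if_neg hg]
    exact (ite_self []).symm

-- Core identity in foldl form, with B's filters keyed by a pointwise-equal map G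
theorem pv_core_main (F G : Int → List Char) (n k a b : Int)
    (acc : List ((Int × Int) × (Int × Int))) (hk : 1 ≤ k)
    (ha0 : 0 ≤ a) (haN : a < n) (hb1 : a + k - 1 ≤ b) (hbN : b < n)
    (hFG : ∀ i, 0 ≤ i → i < n → G i = F i) :
    (PySem.List.pyRange (b + k - 1) (n - k + 1) 1).foldl (fun acc c =>
      (PySem.List.pyRange (c + k - 1) n 1).foldl (fun acc d =>
        if F a = F c ∧ F b = F d then acc ++ [((a, b), (c, d))] else acc) acc) acc
  = ((PySem.List.pyRange 0 n 1).filter (fun i => G i == G a)).foldl (fun acc c =>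
      if b + k - 1 ≤ c ∧ c ≤ n - k then
        ((PySem.List.pyRange 0 n 1).filter (fun i => G i == G b)).foldl (fun acc d =>
          if c + k - 1 ≤ d then acc ++ [((a, b), (c, d))] else acc) acc
      else acc) acc := by
  have hGa : G a = F a := hFG a ha0 haN
  have hGb : G b = F b := hFG b (by omega) hbN
  have hca : (PySem.List.pyRange 0 n 1).filter (fun i => G i == G a)
      = (PySem.List.pyRange 0 n 1).filter (fun i => F i == F a) := by
    apply List.filter_congr; intro i hi
    have him := PySem.List.mem_pyRange_one.mp hi
    rw [hFG i him.1 him.2, hGa]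
  have hcb : (PySem.List.pyRange 0 n 1).filter (fun i => G i == G b)
      = (PySem.List.pyRange 0 n 1).filter (fun i => F i == F b) := by
    apply List.filter_congr; intro i hi
    have him := PySem.List.mem_pyRange_one.mp hi
    rw [hFG i him.1 him.2, hGb]
  rw [hca, hcb]
  simp only [PySem.List.foldl_append_ite]
  simp only [pv_foldl_guard_append, PySem.List.foldl_append_eq_flatMap]
  exact congrArg (fun t => acc ++ t) (pv_core_gen F n k a b hk ha0 hb1)

-- ===== VERDICT (by name: the statement is the Claim_ definition above) =====
theorem find_flanked_substrings_spec : Claim_equal_find_flanked_substrings := by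
  intro sequence k _ hpre
  have hk : 1 ≤ k := hpre
  unfold Spec_find_flanked_substrings find_flanked_substrings find_flanked_substrings_alt
  simp only [PySem.Str.len_eq]
  by_cases hempty : (sequence.toList.length : Int) - 2 * k + 2 ≤ 0
  · rw [if_pos hempty, PySem.List.pyRange_one_eq_nil (by omega), List.foldl_nil]
  rw [if_neg hempty]
  apply PySem.List.foldl_congr_mem'
  intro a ha acc
  have ham := PySem.List.mem_pyRange_one.mp ha
  rw [pv_group_getD]
  apply PySem.List.foldl_congr_mem'
  intro b hb acc'
  have hbm := PySem.List.mem_pyRange_one.mp hb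
  rw [pv_group_getD]
  exact pv_core_main
    (fun i => PySem.List.slice sequence.toList (some i) (some (i + k - 1)))
    (fun i => PySem.List.pyGetD
      ((PySem.List.pyRange 0 ((sequence.toList.length : Int)) 1).map
        (fun j => PySem.List.slice sequence.toList (some j) (some (j + k - 1)))) i [])
    ((sequence.toList.length : Int)) k a b acc' hk (by omega) (by omega) (by omega) (by omega)
    (fun i h0 hn => PySem.List.pyGetD_map_pyRange_of_nonneg _ _ i [] h0 hn)
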